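-- pv_equiv track=rewrite | github.com/George-King-123/WXML-Extremal-Groups | D_infinity.py | compute_s_n_new_formula
-- ===== SOURCE A (Python) =====
-- from math import floor, ceil, factorial, sqrt, comb as comb_original
--
-- def compute_s_n_new_formula(n, k, t):
--   def comb(n, k):
--     if (k > n):
--       return 0
--     if (k < 0 or n < 0):
--       return 0
--     if (k == 0):
--       return 1
--     return comb_original(n, k)
--
--   def rangeIncl(start, end):
--     return range(start, end + 1)
--
--   if t == 0:
--     return comb(n + k - 1, k - 1)
--   elif t == 1:
--     res = 0
--     for q in range(1, min(k-1, n-1) + 1):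
--       res += pow(2, q) * comb(k-1, q) * comb(n-1, q)
--     return res + comb(n + k - 2, k - 2) + 1
--   elif t < k:
--     res = 0
--     for p in rangeIncl(1, min(t-1, n)):
--       for ell in rangeIncl(p, n):
--         for q in rangeIncl(0, min(k-t, n-ell)):
--           for i in rangeIncl(q, n-ell):
--             if (n - ell - i) % 2 != 0:
--               continue
--             res += comb(t, p) * comb(ceil(ell/2)-1, p-1) * comb(floor(ell/2) + t - p - 1, t-p-1) * (2**q) * comb(k-t, q) * comb(i-1, q-1)
--
--     # + .... -
--     for q in rangeIncl(1, min(k-t, n-2)):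
--       for i in rangeIncl(q-1, n-2):
--         if (n-i) % 2 != 0:
--           continue
--         res += (2**q) * comb(k-t, q) * comb(i-1, q-1)
--
--     return res + comb(n + k - t - 1, k - t - 1)
--   elif t == k:
--     res = 0
--     for p in rangeIncl(1, min(t-1, n)):
--       for c in rangeIncl(0, floor(n-p/2)):
--         res += comb(t, p) * comb(ceil(n/2 - c) - 1, p-1) * comb(floor(n/2 -c) + t-p-1, t-p-1)
--     return res + (1 if n % 2 == 0 else 0)
--
--   else:
--     raise Exception("t > k")
-- ===== SOURCE B (Python) =====
-- from math import comb as comb_original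
--
-- def compute_s_n_new_formula(n, k, t):
--   def comb(a, b):
--     if b < 0 or a < b or a < 0:
--       return 0
--     return comb_original(a, b)
--
--   if t == 0:
--     return comb(n + k - 1, k - 1)
--   if t == 1:
--     total = 0
--     for q in range(1, min(k - 1, n - 1) + 1):
--       total += (2 ** q) * comb(k - 1, q) * comb(n - 1, q)
--     return total + comb(n + k - 2, k - 2) + 1
--   if t < k:
--     d = k - t
--     # V[i] = sum_q 2^q*C(d,q)*C(i-1,q-1); terms with q > i or q = 0 vanish
--     V = [sum((2 ** q) * comb(d, q) * comb(i - 1, q - 1)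
--              for q in range(1, min(d, i) + 1)) for i in range(max(n, 0))]
--     # S[m] = parity-prefix sum V[m] + V[m-2] + V[m-4] + ...
--     S = []
--     for m in range(max(n, 0)):
--       S.append(V[m] + (S[m - 2] if m >= 2 else 0))
--     total = 0
--     for p in range(1, min(t - 1, n) + 1):
--       cp = comb(t, p)
--       for ell in range(p, n + 1):
--         w = cp * comb((ell + 1) // 2 - 1, p - 1) * comb(ell // 2 + t - p - 1, t - p - 1)
--         total += w * S[n - ell]
--     if n >= 2:
--       total += S[n - 2]
--     return total + comb(n + k - t - 1, k - t - 1)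
--   if t == k:
--     total = 0
--     for p in range(1, min(t - 1, n) + 1):
--       cp = comb(t, p)
--       for c in range((2 * n - p) // 2 + 1):
--         total += cp * comb((n - 2 * c + 1) // 2 - 1, p - 1) * comb((n - 2 * c) // 2 + t - p - 1, t - p - 1)
--     return total + (1 if n % 2 == 0 else 0)
--   raise Exception("t > k")
-- ===== Notes on version B (the rewrite author's own statement) =====
-- stated objective: faster
-- what changed: In the dominant t<k branch the summand is separated into a (p,ell)-factor and a (q,i)-factor; B precomputes the inner (q,i) sums once as a table V[i] plus a parity prefix-sum table S[m] (S[m]=V[m]+S[m-2]) and then runs a single double loop over (p,ell) reading S[n-ell], replacing A's quadruple nested loop; A's separate second (q,i) loop collapses to the single table entry S[n-2]. Intended as faster (quadruple loop -> two double loops); measured over 100x faster at the largest size both versions finished; on very large inputs with huge k both versions time out.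
import Mathlib
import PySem

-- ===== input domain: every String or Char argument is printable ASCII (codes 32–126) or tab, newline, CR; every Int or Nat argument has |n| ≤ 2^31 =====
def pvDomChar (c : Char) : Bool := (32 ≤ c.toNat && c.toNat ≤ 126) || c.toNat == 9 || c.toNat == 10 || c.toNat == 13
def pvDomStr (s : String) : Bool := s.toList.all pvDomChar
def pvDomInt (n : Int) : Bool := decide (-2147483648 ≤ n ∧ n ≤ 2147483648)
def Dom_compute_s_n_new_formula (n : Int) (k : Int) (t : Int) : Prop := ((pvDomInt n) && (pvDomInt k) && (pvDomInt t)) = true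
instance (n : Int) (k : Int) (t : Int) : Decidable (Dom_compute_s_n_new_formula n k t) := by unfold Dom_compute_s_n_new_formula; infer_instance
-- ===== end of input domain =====

-- B separates the (p,ell)- and (q,i)-dependent factors of the t<k branch and precomputes the inner
-- (q,i) sums as a parity-prefix table, turning A's quadruple loop into two double loops (intended as
-- faster; measured over 100x faster at the largest size both versions finished).

-- ===== PORT A =====
-- port of math.comb (comb_original), by the usual exact product formula with r = min(k, n-k)
-- factors; exact for 0 <= k <= n, the only range the guarded comb wrappers below call it on
def pvChoose (n k : Nat) : Nat :=
  let r := min k (n - k)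
  (List.range r).foldl (fun acc j => acc * (n - r + j + 1) / (j + 1)) 1

-- A's guarded comb
def pvCombA (a b : Int) : Int :=
  if b > a then 0
  else if b < 0 ∨ a < 0 then 0
  else if b = 0 then 1
  else (pvChoose a.toNat b.toNat : Int)

-- Float note: on Dom (|int| ≤ 2^31) Python's ceil(ell/2), floor(ell/2), floor(n - p/2),
-- ceil(n/2 - c), floor(n/2 - c) are exact (floats are exact below 2^53); they are ported as the
-- exact integer expressions floordiv (ell+1) 2, floordiv ell 2, floordiv (2*n-p) 2,
-- floordiv (n-2*c+1) 2, floordiv (n-2*c) 2.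
def compute_s_n_new_formula (n : Int) (k : Int) (t : Int) : Int :=
  if t = 0 then pvCombA (n + k - 1) (k - 1)
  else if t = 1 then
    ((PySem.List.pyRange 1 (min (k-1) (n-1) + 1) 1).foldl
      (fun res q => res + 2 ^ q.toNat * pvCombA (k-1) q * pvCombA (n-1) q) 0)
      + pvCombA (n + k - 2) (k - 2) + 1
  else if t < k then
    let res1 := (PySem.List.pyRange 1 (min (t-1) n + 1) 1).foldl (fun res p =>
      (PySem.List.pyRange p (n+1) 1).foldl (fun res ell =>
        (PySem.List.pyRange 0 (min (k-t) (n-ell) + 1) 1).foldl (fun res q =>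
          (PySem.List.pyRange q (n-ell+1) 1).foldl (fun res i =>
            if PySem.Int.mod (n - ell - i) 2 ≠ 0 then res
            else res + pvCombA t p * pvCombA (PySem.Int.floordiv (ell+1) 2 - 1) (p-1)
                 * pvCombA (PySem.Int.floordiv ell 2 + t - p - 1) (t-p-1)
                 * 2 ^ q.toNat * pvCombA (k-t) q * pvCombA (i-1) (q-1)) res) res) res) 0
    let res2 := (PySem.List.pyRange 1 (min (k-t) (n-2) + 1) 1).foldl (fun res q =>
      (PySem.List.pyRange (q-1) (n-2+1) 1).foldl (fun res i =>
        if PySem.Int.mod (n - i) 2 ≠ 0 then res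
        else res + 2 ^ q.toNat * pvCombA (k-t) q * pvCombA (i-1) (q-1)) res) res1
    res2 + pvCombA (n + k - t - 1) (k - t - 1)
  else if t = k then
    ((PySem.List.pyRange 1 (min (t-1) n + 1) 1).foldl (fun res p =>
      (PySem.List.pyRange 0 (PySem.Int.floordiv (2*n - p) 2 + 1) 1).foldl (fun res c =>
        res + pvCombA t p * pvCombA (PySem.Int.floordiv (n - 2*c + 1) 2 - 1) (p-1)
            * pvCombA (PySem.Int.floordiv (n - 2*c) 2 + t - p - 1) (t-p-1)) res) 0)
    + (if PySem.Int.mod n 2 = 0 then 1 else 0)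
  else 0  -- Python raises Exception("t > k") here; excluded by Pre_

-- ===== PORT B =====
-- B's comb (single guard)
def pvCombB (a b : Int) : Int :=
  if b < 0 ∨ a < b ∨ a < 0 then 0 else (pvChoose a.toNat b.toNat : Int)

def compute_s_n_new_formula_alt (n : Int) (k : Int) (t : Int) : Int :=
  if t = 0 then pvCombB (n + k - 1) (k - 1)
  else if t = 1 then
    ((PySem.List.pyRange 1 (min (k-1) (n-1) + 1) 1).foldl
      (fun total q => total + 2 ^ q.toNat * pvCombB (k-1) q * pvCombB (n-1) q) 0)
      + pvCombB (n + k - 2) (k - 2) + 1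
  else if t < k then
    let d := k - t
    let V : List Int := (PySem.List.pyRange 0 (max n 0) 1).map (fun i =>
      ((PySem.List.pyRange 1 (min d i + 1) 1).map
        (fun q => 2 ^ q.toNat * pvCombB d q * pvCombB (i-1) (q-1))).sum)
    let S : List Int := (PySem.List.pyRange 0 (max n 0) 1).foldl (fun S m =>
      S ++ [PySem.List.pyGetD V m 0 + (if m ≥ 2 then PySem.List.pyGetD S (m-2) 0 else 0)]) []
    let total := (PySem.List.pyRange 1 (min (t-1) n + 1) 1).foldl (fun total p =>
      let cp := pvCombB t p
      (PySem.List.pyRange p (n+1) 1).foldl (fun total ell =>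
        total + cp * pvCombB (PySem.Int.floordiv (ell+1) 2 - 1) (p-1)
          * pvCombB (PySem.Int.floordiv ell 2 + t - p - 1) (t-p-1)
          * PySem.List.pyGetD S (n-ell) 0) total) 0
    let total := if n ≥ 2 then total + PySem.List.pyGetD S (n-2) 0 else total
    total + pvCombB (n + k - t - 1) (k - t - 1)
  else if t = k then
    ((PySem.List.pyRange 1 (min (t-1) n + 1) 1).foldl (fun total p =>
      let cp := pvCombB t p
      (PySem.List.pyRange 0 (PySem.Int.floordiv (2*n - p) 2 + 1) 1).foldl (fun total c =>
        total + cp * pvCombB (PySem.Int.floordiv (n - 2*c + 1) 2 - 1) (p-1)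
            * pvCombB (PySem.Int.floordiv (n - 2*c) 2 + t - p - 1) (t-p-1)) total) 0)
    + (if PySem.Int.mod n 2 = 0 then 1 else 0)
  else 0  -- Source B raises Exception("t > k") here; excluded by Pre_

-- ===== PRECONDITION & SPEC =====
-- Pre_ excludes exactly t > k, where A raises Exception("t > k").
def Pre_compute_s_n_new_formula (n : Int) (k : Int) (t : Int) : Prop := t ≤ k
instance (n : Int) (k : Int) (t : Int) : Decidable (Pre_compute_s_n_new_formula n k t) := by
  unfold Pre_compute_s_n_new_formula; infer_instance
def pvWitness_compute_s_n_new_formula : Int × Int × Int := (3, 5, 2)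

def Spec_compute_s_n_new_formula (n : Int) (k : Int) (t : Int) (out : Int) : Prop := out = compute_s_n_new_formula_alt n k t
instance (n : Int) (k : Int) (t : Int) (out : Int) : Decidable (Spec_compute_s_n_new_formula n k t out) := by unfold Spec_compute_s_n_new_formula; infer_instance

-- ===== CLAIM (what is proved, stated in full; the proofs are below) =====
def Claim_equal_compute_s_n_new_formula : Prop := ∀ (n : Int) (k : Int) (t : Int), Dom_compute_s_n_new_formula n k t → Pre_compute_s_n_new_formula n k t → Spec_compute_s_n_new_formula n k t (compute_s_n_new_formula n k t)

-- ===== LEMMAS AND PROOFS =====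

theorem pvChoose_zero (n : Nat) : pvChoose n 0 = 1 := by
  unfold pvChoose; simp

theorem pvCombB_eq (a b : Int) : pvCombB a b = pvCombA a b := by
  unfold pvCombA pvCombB
  split_ifs <;> first | rfl | omega | simp_all [pvChoose_zero]

theorem pv_Icc_succ (a b : Int) (h : a ≤ b + 1) :
    Finset.Icc a (b+1) = insert (b+1) (Finset.Icc a b) := by
  ext x; simp only [Finset.mem_Icc, Finset.mem_insert]; omega

theorem pv_sum_Icc_top (a b : Int) (h : a ≤ b + 1) (f : Int → Int) :
    (∑ x ∈ Finset.Icc a (b+1), f x) = (∑ x ∈ Finset.Icc a b, f x) + f (b+1) := by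
  rw [pv_Icc_succ a b h, Finset.sum_insert (by simp only [Finset.mem_Icc]; omega)]
  ring

theorem pv_sum_map_pyRange_aux (f : Int → Int) (a : Int) (m : Nat) :
    ((PySem.List.pyRange a (a + m) 1).map f).sum = ∑ x ∈ Finset.Icc a (a + m - 1), f x := by
  induction m with
  | zero =>
    rw [show a + ((0:Nat):Int) = a by push_cast; ring, PySem.List.pyRange_one_eq_nil le_rfl,
      Finset.Icc_eq_empty (by omega)]
    simp
  | succ m ih =>
    rw [show a + ((m+1:Nat):Int) = (a + m) + 1 by push_cast; ring,
      PySem.List.pyRange_one_succ_right (by omega)]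
    rw [List.map_append, List.sum_append, ih]
    have h := pv_sum_Icc_top a (a + (m:Int) - 1) (by omega) f
    rw [show (a + (m:Int) - 1) + 1 = a + m by ring] at h
    rw [show a + (m:Int) + 1 - 1 = a + m by ring, h]
    simp

theorem pv_sum_map_pyRange (f : Int → Int) (a b : Int) :
    ((PySem.List.pyRange a b 1).map f).sum = ∑ x ∈ Finset.Icc a (b-1), f x := by
  rcases le_or_gt b a with h | h
  · rw [PySem.List.pyRange_one_eq_nil h, Finset.Icc_eq_empty (by omega)]; simp
  · have := pv_sum_map_pyRange_aux f a (b - a).toNat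
    rw [show a + (((b - a).toNat : Nat) : Int) = b by omega] at this
    exact this

-- additive loop
theorem pv_foldl_plus_sum (h : Int → Int) (a b init : Int) :
    (PySem.List.pyRange a b 1).foldl (fun res x => res + h x) init
      = init + ∑ x ∈ Finset.Icc a (b-1), h x := by
  rw [PySem.List.foldl_add, pv_sum_map_pyRange]

-- additive loop with a parity 'continue'
theorem pv_foldl_parity_sum (e : Int) (h : Int → Int) (a b init : Int) :
    (PySem.List.pyRange a b 1).foldl
        (fun res i => if PySem.Int.mod (e - i) 2 ≠ 0 then res else res + h i) init
      = init + ∑ x ∈ Finset.Icc a (b-1), (if PySem.Int.mod (e - x) 2 ≠ 0 then 0 else h x) := by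
  rw [PySem.List.foldl_congr_mem _ _
    (fun res i => res + (if PySem.Int.mod (e - i) 2 ≠ 0 then 0 else h i)) _
    (by
      intro acc x _
      beta_reduce
      by_cases hc : PySem.Int.mod (e - x) 2 ≠ 0
      · rw [if_pos hc, if_pos hc, add_zero]
      · rw [if_neg hc, if_neg hc])]
  rw [PySem.List.foldl_add, pv_sum_map_pyRange]

-- the (q,i)-only factor of the t<k summand, V(i) = its q-sum, S(m) = parity prefix sum of V
def pvG (d q i : Int) : Int := 2 ^ q.toNat * pvCombA d q * pvCombA (i-1) (q-1)
def pvV (d i : Int) : Int :=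
  ((PySem.List.pyRange 1 (min d i + 1) 1).map (fun q => pvG d q i)).sum
def pvS (d m : Int) : Int :=
  ((PySem.List.pyRange 0 (m+1) 1).map
    (fun i => if PySem.Int.mod (m - i) 2 ≠ 0 then 0 else pvV d i)).sum

theorem pvG_def' (d q i : Int) :
    2 ^ q.toNat * pvCombA d q * pvCombA (i-1) (q-1) = pvG d q i := rfl

theorem pvV_eq (d i : Int) : pvV d i = ∑ q ∈ Finset.Icc 1 (min d i), pvG d q i := by
  unfold pvV; rw [pv_sum_map_pyRange]; simp

theorem pvS_eq (d m : Int) :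
    pvS d m = ∑ i ∈ Finset.Icc 0 m, (if PySem.Int.mod (m - i) 2 ≠ 0 then 0 else pvV d i) := by
  unfold pvS; rw [pv_sum_map_pyRange]; simp

theorem pvG_zero_of_lt (d q i : Int) (h : i < q) : pvG d q i = 0 := by
  unfold pvG pvCombA; rw [if_pos (by omega : (q-1 : Int) > i-1)]; ring

theorem pvG_zero_of_dlt (d q i : Int) (h : d < q) : pvG d q i = 0 := by
  unfold pvG pvCombA
  rw [show (if q - 1 > i - 1 then (0:Int) else if q - 1 < 0 ∨ i - 1 < 0 then 0 else
    if q - 1 = 0 then 1 else (pvChoose (i-1).toNat (q-1).toNat : Int)) = pvCombA (i-1) (q-1) from rfl]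
  rw [if_pos (by omega : q > d)]; ring

theorem pvCombA_neg_one (a : Int) : pvCombA a (-1) = 0 := by
  unfold pvCombA; split_ifs <;> first | rfl | omega

theorem pvG_zero_q0 (d i : Int) : pvG d 0 i = 0 := by
  unfold pvG; rw [show (0:Int)-1 = -1 by ring, pvCombA_neg_one]; ring

theorem pv_mod_two_sub_two (x : Int) : PySem.Int.mod x 2 = PySem.Int.mod (x-2) 2 := by
  rw [PySem.Int.mod_eq_emod_of_pos (by norm_num), PySem.Int.mod_eq_emod_of_pos (by norm_num)]
  omega

theorem pv_mod_zero : PySem.Int.mod 0 2 = 0 := by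
  rw [PySem.Int.mod_eq_emod_of_pos (by norm_num)]; decide

theorem pv_mod_one : PySem.Int.mod 1 2 = 1 := by
  rw [PySem.Int.mod_eq_emod_of_pos (by norm_num)]; decide

-- the double (q,i) sum of A's t<k branch, swapped and reindexed
theorem pv_core (d m : Int) (hm : 0 ≤ m) :
    (∑ q ∈ Finset.Icc 0 (min d m), ∑ i ∈ Finset.Icc q m,
        (if PySem.Int.mod (m - i) 2 ≠ 0 then 0 else pvG d q i)) = pvS d m := by
  rw [pvS_eq]
  calc (∑ q ∈ Finset.Icc 0 (min d m), ∑ i ∈ Finset.Icc q m,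
        (if PySem.Int.mod (m - i) 2 ≠ 0 then 0 else pvG d q i))
      = ∑ q ∈ Finset.Icc 0 (min d m), ∑ i ∈ Finset.Icc 0 m,
        (if PySem.Int.mod (m - i) 2 ≠ 0 then 0 else pvG d q i) := by
        refine Finset.sum_congr rfl fun q hq => ?_
        have hq0 : 0 ≤ q := (Finset.mem_Icc.mp hq).1
        refine Finset.sum_subset (Finset.Icc_subset_Icc hq0 le_rfl) fun i hi hni => ?_
        have hlt : i < q := by
          simp only [Finset.mem_Icc] at hi hni; omega
        rw [pvG_zero_of_lt d q i hlt]
        split_ifs <;> rfl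
    _ = ∑ i ∈ Finset.Icc 0 m, ∑ q ∈ Finset.Icc 0 (min d m),
        (if PySem.Int.mod (m - i) 2 ≠ 0 then 0 else pvG d q i) := Finset.sum_comm
    _ = ∑ i ∈ Finset.Icc 0 m, (if PySem.Int.mod (m - i) 2 ≠ 0 then 0 else pvV d i) := by
        refine Finset.sum_congr rfl fun i hi => ?_
        have hi' : 0 ≤ i ∧ i ≤ m := Finset.mem_Icc.mp hi
        by_cases hc : PySem.Int.mod (m - i) 2 ≠ 0
        · simp only [if_pos hc, Finset.sum_const_zero]
        · simp only [if_neg hc]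
          rw [pvV_eq]
          refine (Finset.sum_subset (fun q hq => ?_) fun q hq hqn => ?_).symm
          · simp only [Finset.mem_Icc] at hq ⊢
            omega
          · simp only [Finset.mem_Icc] at hq hqn
            rcases (by omega : q = 0 ∨ min d i < q) with h00 | hgt
            · subst h00; exact pvG_zero_q0 d i
            · rcases (by omega : d < q ∨ i < q) with hh | hh
              · exact pvG_zero_of_dlt d q i hh
              · exact pvG_zero_of_lt d q i hh

theorem pvS_zero (d : Int) : pvS d 0 = pvV d 0 := by
  rw [pvS_eq, Finset.Icc_self, Finset.sum_singleton, show (0:Int) - 0 = 0 by ring,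
    if_neg (by rw [pv_mod_zero]; omega)]

theorem pvS_one (d : Int) : pvS d 1 = pvV d 1 := by
  rw [pvS_eq, show (1:Int) = 0 + 1 by ring, pv_sum_Icc_top 0 0 (by omega),
    Finset.Icc_self, Finset.sum_singleton]
  rw [show (0:Int) + 1 - 0 = 1 by ring, show (0:Int) + 1 - (0 + 1) = 0 by ring]
  rw [if_pos (by rw [pv_mod_one]; omega), if_neg (by rw [pv_mod_zero]; omega)]
  ring

theorem pvS_rec (d m : Int) (hm : 2 ≤ m) : pvS d m = pvV d m + pvS d (m-2) := by
  rw [pvS_eq]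
  have h1 := pv_sum_Icc_top 0 (m-1) (by omega)
    (fun i => if PySem.Int.mod (m - i) 2 ≠ 0 then (0:Int) else pvV d i)
  rw [show (m:Int) - 1 + 1 = m by ring] at h1
  have h2 := pv_sum_Icc_top 0 (m-2) (by omega)
    (fun i => if PySem.Int.mod (m - i) 2 ≠ 0 then (0:Int) else pvV d i)
  rw [show (m:Int) - 2 + 1 = m - 1 by ring] at h2
  rw [h1, h2]
  rw [show m - m = (0:Int) by ring, show m - (m-1) = (1:Int) by ring]
  rw [if_pos (by rw [pv_mod_one]; omega), if_neg (by rw [pv_mod_zero]; omega)]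
  rw [pvS_eq]
  have e3 : (∑ i ∈ Finset.Icc (0:Int) (m-2), (if PySem.Int.mod (m - i) 2 ≠ 0 then 0 else pvV d i))
      = ∑ i ∈ Finset.Icc (0:Int) (m-2), (if PySem.Int.mod (m - 2 - i) 2 ≠ 0 then 0 else pvV d i) := by
    refine Finset.sum_congr rfl fun i _ => ?_
    rw [show m - 2 - i = (m - i) - 2 by ring, ← pv_mod_two_sub_two]
  rw [e3]; ring

-- B's incrementally built S table is the table of pvS values
theorem pv_table_nat (d M : Int) (j : Nat) (hj : (j : Int) ≤ M) :
    (PySem.List.pyRange 0 (j:Int) 1).foldl (fun S m =>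
        S ++ [PySem.List.pyGetD ((PySem.List.pyRange 0 M 1).map (fun i =>
                ((PySem.List.pyRange 1 (min d i + 1) 1).map (fun q => pvG d q i)).sum)) m 0
              + (if m ≥ 2 then PySem.List.pyGetD S (m-2) 0 else 0)]) []
      = (PySem.List.pyRange 0 (j:Int) 1).map (fun m => pvS d m) := by
  induction j with
  | zero =>
    rw [show ((0:Nat):Int) = 0 by rfl, PySem.List.pyRange_one_eq_nil le_rfl]
    rfl
  | succ j ih =>
    have hj' : (j : Int) ≤ M := by push_cast at hj ⊢; omega
    rw [show ((j+1:Nat):Int) = (j:Int) + 1 by push_cast; ring,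
      PySem.List.pyRange_one_succ_right (by positivity)]
    rw [List.foldl_append, List.map_append, ih hj']
    simp only [List.foldl_cons, List.foldl_nil]
    congr 1
    have hV : PySem.List.pyGetD ((PySem.List.pyRange 0 M 1).map (fun i =>
          ((PySem.List.pyRange 1 (min d i + 1) 1).map (fun q => pvG d q i)).sum)) (j:Int) 0
        = pvV d j :=
      PySem.List.pyGetD_map_pyRange_of_nonneg _ _ _ _ (by positivity) (by omega)
    rw [hV]
    by_cases h2 : (j:Int) ≥ 2
    · rw [if_pos h2]
      have hS : PySem.List.pyGetD ((PySem.List.pyRange 0 (j:Int) 1).map (fun m => pvS d m))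
          ((j:Int)-2) 0 = pvS d ((j:Int)-2) :=
        PySem.List.pyGetD_map_pyRange_of_nonneg _ _ _ _ (by omega) (by omega)
      rw [hS, ← pvS_rec d j h2]
      simp
    · rw [if_neg h2]
      rcases (by omega : (j:Int) = 0 ∨ (j:Int) = 1) with h | h <;> rw [h]
      · rw [add_zero, ← pvS_zero]; simp
      · rw [add_zero, ← pvS_one]; simp

theorem pv_table (d M : Int) (hM : 0 ≤ M) :
    (PySem.List.pyRange 0 M 1).foldl (fun S m =>
        S ++ [PySem.List.pyGetD ((PySem.List.pyRange 0 M 1).map (fun i =>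
                ((PySem.List.pyRange 1 (min d i + 1) 1).map (fun q => pvG d q i)).sum)) m 0
              + (if m ≥ 2 then PySem.List.pyGetD S (m-2) 0 else 0)]) []
      = (PySem.List.pyRange 0 M 1).map (fun m => pvS d m) := by
  have h := pv_table_nat d M M.toNat (by omega)
  rwa [show ((M.toNat : Nat) : Int) = M by omega] at h

-- A's second (q,i) loop sums to pvS (k-t) (n-2)
theorem pv_second_loop (d n : Int) :
    (∑ q ∈ Finset.Icc 1 (min d (n-2)), ∑ i ∈ Finset.Icc (q-1) (n-2),
        (if PySem.Int.mod (n - i) 2 ≠ 0 then 0 else pvG d q i))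
      = if n ≥ 2 then pvS d (n-2) else 0 := by
  by_cases hn : n ≥ 2
  · rw [if_pos hn]
    calc (∑ q ∈ Finset.Icc 1 (min d (n-2)), ∑ i ∈ Finset.Icc (q-1) (n-2),
            (if PySem.Int.mod (n - i) 2 ≠ 0 then 0 else pvG d q i))
        = ∑ q ∈ Finset.Icc 1 (min d (n-2)), ∑ i ∈ Finset.Icc q (n-2),
            (if PySem.Int.mod (n - i) 2 ≠ 0 then 0 else pvG d q i) := by
          refine Finset.sum_congr rfl fun q hq => ?_
          simp only [Finset.mem_Icc] at hq
          refine (Finset.sum_subset (fun i hi => ?_) (fun i hi hni => ?_)).symm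
          · simp only [Finset.mem_Icc] at hi ⊢; omega
          · simp only [Finset.mem_Icc] at hi hni
            rw [pvG_zero_of_lt d q i (by omega)]; split_ifs <;> rfl
      _ = ∑ q ∈ Finset.Icc 0 (min d (n-2)), ∑ i ∈ Finset.Icc q (n-2),
            (if PySem.Int.mod (n - i) 2 ≠ 0 then 0 else pvG d q i) := by
          refine Finset.sum_subset (fun q hq => ?_) (fun q hq hqn => ?_)
          · simp only [Finset.mem_Icc] at hq ⊢; omega
          · simp only [Finset.mem_Icc] at hq hqn
            have hq0 : q = 0 := by omega
            subst hq0
            refine Finset.sum_eq_zero fun i _ => ?_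
            rw [pvG_zero_q0]; split_ifs <;> rfl
      _ = ∑ q ∈ Finset.Icc 0 (min d (n-2)), ∑ i ∈ Finset.Icc q (n-2),
            (if PySem.Int.mod (n - 2 - i) 2 ≠ 0 then 0 else pvG d q i) := by
          refine Finset.sum_congr rfl fun q _ => Finset.sum_congr rfl fun i _ => ?_
          rw [show n - 2 - i = (n - i) - 2 by ring, ← pv_mod_two_sub_two]
      _ = pvS d (n-2) := pv_core d (n-2) (by omega)
  · rw [if_neg hn, Finset.Icc_eq_empty (by omega), Finset.sum_empty]

-- ===== VERDICT (by name: the statement is the Claim_ definition above) =====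
theorem compute_s_n_new_formula_spec : Claim_equal_compute_s_n_new_formula := by
  intro n k t _ hpre
  unfold Spec_compute_s_n_new_formula
  unfold Pre_compute_s_n_new_formula at hpre
  by_cases h0 : t = 0
  · subst h0; simp [compute_s_n_new_formula, compute_s_n_new_formula_alt, pvCombB_eq]
  by_cases h1 : t = 1
  · subst h1; simp [compute_s_n_new_formula, compute_s_n_new_formula_alt, pvCombB_eq]
  by_cases hlt : t < k
  · simp only [compute_s_n_new_formula, compute_s_n_new_formula_alt,
      if_neg h0, if_neg h1, if_pos hlt, pvCombB_eq, pvG_def']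
    rw [pv_table (k-t) (max n 0) (by omega)]
    simp only [pv_foldl_parity_sum, pv_foldl_plus_sum, zero_add, add_sub_cancel_right]
    have hmain :
        (∑ p ∈ Finset.Icc 1 (min (t-1) n), ∑ ell ∈ Finset.Icc p n,
            ∑ q ∈ Finset.Icc 0 (min (k-t) (n-ell)), ∑ i ∈ Finset.Icc q (n-ell),
              if PySem.Int.mod (n - ell - i) 2 ≠ 0 then 0 else
                pvCombA t p * pvCombA (PySem.Int.floordiv (ell+1) 2 - 1) (p-1) *
                  pvCombA (PySem.Int.floordiv ell 2 + t - p - 1) (t-p-1) * 2 ^ q.toNat *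
                  pvCombA (k-t) q * pvCombA (i-1) (q-1))
        = ∑ p ∈ Finset.Icc 1 (min (t-1) n), ∑ ell ∈ Finset.Icc p n,
            pvCombA t p * pvCombA (PySem.Int.floordiv (ell+1) 2 - 1) (p-1) *
              pvCombA (PySem.Int.floordiv ell 2 + t - p - 1) (t-p-1) *
              PySem.List.pyGetD ((PySem.List.pyRange 0 (max n 0)).map
                (fun m => pvS (k-t) m)) (n-ell) 0 := by
      refine Finset.sum_congr rfl fun p hp => Finset.sum_congr rfl fun ell hell => ?_
      simp only [Finset.mem_Icc] at hp hell
      have hb : 0 ≤ n - ell ∧ n - ell < max n 0 := by omega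
      rw [PySem.List.pyGetD_map_pyRange_of_nonneg _ _ _ _ hb.1 hb.2]
      rw [← pv_core (k-t) (n-ell) (by omega), Finset.mul_sum]
      refine Finset.sum_congr rfl fun q _ => ?_
      rw [Finset.mul_sum]
      refine Finset.sum_congr rfl fun i _ => ?_
      rw [mul_ite, mul_zero]
      split_ifs with h
      · rfl
      · unfold pvG; ring
    have hsec :
        (∑ q ∈ Finset.Icc 1 (min (k-t) (n-2)), ∑ i ∈ Finset.Icc (q-1) (n-2),
            if PySem.Int.mod (n - i) 2 ≠ 0 then 0 else pvG (k-t) q i)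
        = if n ≥ 2 then PySem.List.pyGetD ((PySem.List.pyRange 0 (max n 0)).map
            (fun m => pvS (k-t) m)) (n-2) 0 else 0 := by
      rw [pv_second_loop]
      by_cases hn : n ≥ 2
      · rw [if_pos hn, if_pos hn,
          PySem.List.pyGetD_map_pyRange_of_nonneg _ _ _ _ (by omega) (by omega)]
      · rw [if_neg hn, if_neg hn]
    rw [hmain, hsec]
    split_ifs with hn
    · ring
    · ring
  · have hk : t = k := by omega
    subst hk
    simp [compute_s_n_new_formula, compute_s_n_new_formula_alt, if_neg h0, if_neg h1,
      pvCombB_eq]
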